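-- pv_equiv track=rewrite | github.com/crypticpy/GrantScope2 | advisor/stages.py | _get_missing_section_type
-- ===== SOURCE A (Python) =====
-- from typing import Any, Dict, List
--
-- def _get_missing_section_type(sections: List[Dict[str, Any]]) -> str:
--     """Determine what type of section is missing."""
--     existing_titles = [s.get("title", "").lower() for s in sections]
--
--     section_types = [
--         "overview", "funding patterns", "key players", "populations",
--         "geographies", "time trends", "actionable insights", "next steps",
--         "risk factors", "opportunities", "recommendations", "conclusion"
--     ]
--
--     for section_type in section_types:
--         if not any(section_type in title for title in existing_titles):
--             return section_type
--
--     # If all common types are covered, add a generic one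
--     return f"additional_insights_{len(sections) + 1}"
-- ===== SOURCE B (Python) =====
-- def _get_missing_section_type(sections):
--     """Determine what type of section is missing."""
--     remaining = [
--         "overview", "funding patterns", "key players", "populations",
--         "geographies", "time trends", "actionable insights", "next steps",
--         "risk factors", "opportunities", "recommendations", "conclusion"
--     ]
--     # sieve: one pass over the sections, crossing off every type covered by that title
--     for s in sections:
--         title = s.get("title", "").lower()
--         remaining = [st for st in remaining if st not in title]
--         if not remaining:
--             break
--     if remaining:
--         return remaining[0]
--     return f"additional_insights_{len(sections) + 1}"
-- ===== Notes on version B (the rewrite author's own statement) =====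
-- stated objective: alternative
-- what changed: B inverts the loops: a single sieve pass over the sections shrinks a 'remaining' candidate list (crossing off types covered by each title, stopping early when it empties) and returns its head, instead of A's per-type any() scan over all titles.
import Mathlib
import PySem

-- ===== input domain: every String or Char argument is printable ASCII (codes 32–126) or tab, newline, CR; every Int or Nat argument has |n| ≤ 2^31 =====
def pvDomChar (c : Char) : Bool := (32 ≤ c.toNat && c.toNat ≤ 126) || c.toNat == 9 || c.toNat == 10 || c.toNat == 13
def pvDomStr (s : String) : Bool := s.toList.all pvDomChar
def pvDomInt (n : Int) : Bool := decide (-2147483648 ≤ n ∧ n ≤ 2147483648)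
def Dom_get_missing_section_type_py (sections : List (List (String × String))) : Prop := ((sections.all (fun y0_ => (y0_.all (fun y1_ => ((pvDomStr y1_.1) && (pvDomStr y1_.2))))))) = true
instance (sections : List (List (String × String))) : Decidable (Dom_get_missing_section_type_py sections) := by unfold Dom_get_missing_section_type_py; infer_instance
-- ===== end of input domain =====

-- B inverts A's loops: one sieve pass over the sections shrinks a 'remaining' candidate
-- list (with early exit when it empties) and returns its head (objective: alternative).

-- ===== PORT A =====
-- the fixed list of section types (shared literal of both Pythons)
def pvSectionTypes : List String :=
  ["overview", "funding patterns", "key players", "populations",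
   "geographies", "time trends", "actionable insights", "next steps",
   "risk factors", "opportunities", "recommendations", "conclusion"]

-- A's 'for section_type in section_types' loop with its inner any() scan over the titles
def pvLoopA (titles : List String) (nsec : Int) : List String → String
  | [] => "additional_insights_" ++ PySem.Int.toStr (nsec + 1)
  | st :: rest =>
    if !(titles.any (fun t => PySem.Str.isIn st t)) then st
    else pvLoopA titles nsec rest

def get_missing_section_type_py (sections : List (List (String × String))) : String :=
  let existing_titles := sections.map (fun s => PySem.Str.lower (PySem.Dict.getD (PySem.Dict.mk s) "title" ""))
  pvLoopA existing_titles (PySem.List.len sections) pvSectionTypes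

-- ===== PORT B =====
-- B's sieve: 'for s in sections: remaining = [st for st in remaining if st not in title]; break when empty'
def pvSieve : List String → List (List (String × String)) → List String
  | remaining, [] => remaining
  | remaining, s :: rest =>
    let title := PySem.Str.lower (PySem.Dict.getD (PySem.Dict.mk s) "title" "")
    let remaining' := remaining.filter (fun st => !(PySem.Str.isIn st title))
    if remaining'.isEmpty then remaining' else pvSieve remaining' rest

def get_missing_section_type_py_alt (sections : List (List (String × String))) : String :=
  match pvSieve pvSectionTypes sections with
  | st :: _ => st
  | [] => "additional_insights_" ++ PySem.Int.toStr (PySem.List.len sections + 1)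

-- ===== PRECONDITION & SPEC =====
def Spec_get_missing_section_type_py (sections : List (List (String × String))) (out : String) : Prop := out = get_missing_section_type_py_alt sections
instance (sections : List (List (String × String))) (out : String) : Decidable (Spec_get_missing_section_type_py sections out) := by unfold Spec_get_missing_section_type_py; infer_instance

-- ===== CLAIM (what is proved, stated in full; the proofs are below) =====
def Claim_equal_get_missing_section_type_py : Prop := ∀ (sections : List (List (String × String))), Dom_get_missing_section_type_py sections → Spec_get_missing_section_type_py sections (get_missing_section_type_py sections)

-- ===== LEMMAS AND PROOFS =====

-- the sieve computes the filter of the candidate list by 'no processed title contains st'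
theorem pvSieve_eq (secs : List (List (String × String))) (rem : List String) :
    pvSieve rem secs
      = rem.filter (fun st => secs.all (fun s =>
          !(PySem.Str.isIn st (PySem.Str.lower (PySem.Dict.getD (PySem.Dict.mk s) "title" ""))))) := by
  induction secs generalizing rem with
  | nil => simp [pvSieve]
  | cons s rest ih =>
    simp only [pvSieve, List.all_cons]
    split
    · next h =>
      rw [List.isEmpty_iff] at h
      rw [h, ← List.filter_filter, List.filter_comm, h, List.filter_nil]
    · rw [ih, List.filter_filter]
      exact List.filter_congr (fun a _ => Bool.and_comm _ _)

-- A's loop returns the head of the same filter (or the fallback when it is empty)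
theorem pvLoopA_eq (titles : List String) (nsec : Int) (sts : List String) :
    pvLoopA titles nsec sts
      = match sts.filter (fun st => !(titles.any (fun t => PySem.Str.isIn st t))) with
        | st :: _ => st
        | [] => "additional_insights_" ++ PySem.Int.toStr (nsec + 1) := by
  induction sts with
  | nil => simp [pvLoopA]
  | cons st rest ih =>
    simp only [pvLoopA, List.filter_cons]
    cases h : titles.any (fun t => PySem.Str.isIn st t)
    · simp
    · simp [ih]

-- ===== VERDICT (by name: the statement is the Claim_ definition above) =====
theorem get_missing_section_type_py_spec : Claim_equal_get_missing_section_type_py := by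
  intro sections _
  unfold Spec_get_missing_section_type_py get_missing_section_type_py get_missing_section_type_py_alt
  rw [pvSieve_eq, pvLoopA_eq]
  congr 1
  apply List.filter_congr
  intro st _
  simp only [List.any_eq_not_all_not, Bool.not_not, List.all_map, Function.comp_def]
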